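-- pv_equiv track=rewrite | github.com/lmrae0624/Algorithm | 프로그래머스/카카오/**괄호 변환.py | count
-- ===== SOURCE A (Python) =====
-- def count(string):
--     count=0
--     for i in range(len(string)):
--         if string[i]=='(':
--             count+=1
--         else:
--             count-=1
--         if count==0:
--             return i
-- ===== SOURCE B (Python) =====
-- def count(string):
--     # Two separate phases: materialize the running-balance table, then scan it.
--     sums = []
--     total = 0
--     for ch in string:
--         total += 1 if ch == '(' else -1
--         sums.append(total)
--     for i, s in enumerate(sums):
--         if s == 0:
--             return i
-- ===== Notes on version B (the rewrite author's own statement) =====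
-- stated objective: alternative
-- what changed: A fuses balance accumulation and the zero test in one short-circuit indexed loop; B materializes the full prefix-balance table in a first pass and then scans that table for the first zero in a second pass.
import Mathlib
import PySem

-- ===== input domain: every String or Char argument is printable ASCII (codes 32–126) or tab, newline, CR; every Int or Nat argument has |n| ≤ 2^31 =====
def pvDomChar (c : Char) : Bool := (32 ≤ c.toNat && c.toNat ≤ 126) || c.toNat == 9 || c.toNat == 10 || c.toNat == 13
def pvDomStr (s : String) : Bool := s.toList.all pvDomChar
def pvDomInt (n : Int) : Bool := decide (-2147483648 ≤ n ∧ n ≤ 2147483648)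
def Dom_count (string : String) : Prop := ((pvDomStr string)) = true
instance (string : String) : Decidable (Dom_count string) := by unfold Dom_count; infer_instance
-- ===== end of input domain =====

-- B changes the decomposition only: one fused short-circuit loop (A) vs prefix-balance table then a scan (B); same return value.

-- ===== PORT A =====
-- 'for i in range(len(string))' with string[i] ported as structural recursion over the
-- characters carrying the index i — exact, since the indices visited are 0,1,…,len-1.
def countGo : List Char → Int → Int → Option Int
  | [], _, _ => none
  | c :: rest, cnt, i =>
    let cnt' := if c = '(' then cnt + 1 else cnt - 1
    if cnt' = 0 then some i else countGo rest cnt' (i + 1)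

def count (string : String) : Option Int :=
  countGo string.toList 0 0

-- ===== PORT B =====
-- phase 1: the materialized running-balance table (sums)
def prefixSums : List Char → Int → List Int
  | [], _ => []
  | c :: rest, total =>
    let total' := total + (if c = '(' then 1 else -1)
    total' :: prefixSums rest total'

-- phase 2: first index whose entry is zero ('for i, s in enumerate(sums)')
def firstZero : List Int → Int → Option Int
  | [], _ => none
  | s :: rest, i => if s = 0 then some i else firstZero rest (i + 1)

def count_alt (string : String) : Option Int :=
  firstZero (prefixSums string.toList 0) 0

-- ===== PRECONDITION & SPEC =====
def Spec_count (string : String) (out : Option Int) : Prop := out = count_alt string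
instance (string : String) (out : Option Int) : Decidable (Spec_count string out) := by unfold Spec_count; infer_instance

-- ===== CLAIM (what is proved, stated in full; the proofs are below) =====
def Claim_equal_count : Prop := ∀ (string : String), Dom_count string → Spec_count string (count string)

-- ===== LEMMAS AND PROOFS =====
theorem countGo_eq_firstZero (s : List Char) :
    ∀ (cnt i : Int), countGo s cnt i = firstZero (prefixSums s cnt) i := by
  induction s with
  | nil => intro cnt i; rfl
  | cons c rest ih =>
    intro cnt i
    simp only [countGo, prefixSums, firstZero]
    have h : (if c = '(' then cnt + 1 else cnt - 1) = cnt + (if c = '(' then 1 else -1) := by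
      split_ifs <;> ring
    rw [h]
    split_ifs <;> first | rfl | exact ih _ _

-- ===== VERDICT (by name: the statement is the Claim_ definition above) =====
theorem count_spec : Claim_equal_count := by
  intro string _
  unfold Spec_count count count_alt
  exact countGo_eq_firstZero _ 0 0
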